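-- pv_equiv track=rewrite | github.com/hopingZ/DOCS2025 | algorithm_Demo.py | get_enable_transitions
-- ===== SOURCE A (Python) =====
-- def get_enable_transitions(
--         m_of_place_named,
--         pre_place_names_of_transition_named,
-- ):
--     enable_transition_names = []
--     for transition_name in pre_place_names_of_transition_named:
--         pre_place_names = pre_place_names_of_transition_named[transition_name]
--         enable = True
--         for pre_place_name in pre_place_names:
--             if pre_place_name not in m_of_place_named or m_of_place_named[pre_place_name] < 1:
--                 enable = False
--                 break
--         if enable:
--             enable_transition_names.append(transition_name)
--
--     return enable_transition_names
-- ===== SOURCE B (Python) =====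
-- def get_enable_transitions(
--         m_of_place_named,
--         pre_place_names_of_transition_named,
-- ):
--     # Inverted-index counting: each transition starts owing one token per
--     # distinct pre-place; every marked place pays the transitions indexed
--     # under it; transitions with nothing left owed are enabled.
--     remaining = {}
--     index = {}
--     for t, pre in pre_place_names_of_transition_named.items():
--         distinct = set(pre)
--         remaining[t] = len(distinct)
--         for p in distinct:
--             index.setdefault(p, []).append(t)
--     for p, v in m_of_place_named.items():
--         if v >= 1:
--             for t in index.get(p, []):
--                 remaining[t] -= 1
--     return [t for t, r in remaining.items() if r == 0]
-- ===== Notes on version B (the rewrite author's own statement) =====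
-- stated objective: alternative
-- what changed: B builds an inverted place-to-transitions index and a per-transition counter of distinct pre-places in one pass over the table, then lets each marked place decrement the counters of the transitions indexed under it, returning the transitions whose counter reached zero, instead of A's nested loop re-checking every pre-place of every transition against the marking.
import Mathlib
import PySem

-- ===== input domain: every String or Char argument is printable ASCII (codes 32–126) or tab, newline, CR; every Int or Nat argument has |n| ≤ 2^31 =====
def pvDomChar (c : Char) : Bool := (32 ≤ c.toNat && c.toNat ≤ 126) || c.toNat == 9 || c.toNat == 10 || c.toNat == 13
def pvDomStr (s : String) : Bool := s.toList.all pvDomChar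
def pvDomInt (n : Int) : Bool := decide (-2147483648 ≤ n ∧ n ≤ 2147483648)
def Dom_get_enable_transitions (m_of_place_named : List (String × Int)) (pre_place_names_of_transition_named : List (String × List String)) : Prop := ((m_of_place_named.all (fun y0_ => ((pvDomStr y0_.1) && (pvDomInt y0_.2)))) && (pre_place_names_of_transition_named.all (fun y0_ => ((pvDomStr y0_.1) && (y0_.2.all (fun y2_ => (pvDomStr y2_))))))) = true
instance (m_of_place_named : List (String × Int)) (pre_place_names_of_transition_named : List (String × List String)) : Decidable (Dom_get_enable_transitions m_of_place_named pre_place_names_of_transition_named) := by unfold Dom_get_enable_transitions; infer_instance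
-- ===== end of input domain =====

-- B replaces A's nested per-transition re-check by an inverted place→transitions index with
-- per-transition counters of distinct unmet pre-places (objective: alternative algorithm).

-- ===== PORT A =====
-- inner 'for pre_place_name in pre_place_names: … break' loop of A, as structural recursion
def pvEnableA (m_of_place_named : List (String × Int)) : List String → Bool
  | [] => true
  | pre_place_name :: rest =>
    match (PySem.Dict.mk m_of_place_named).get? pre_place_name with
    | none => false                               -- 'pre_place_name not in m_of_place_named'
    | some v => if v < 1 then false else pvEnableA m_of_place_named rest

def get_enable_transitions (m_of_place_named : List (String × Int)) (pre_place_names_of_transition_named : List (String × List String)) : List String :=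
  pre_place_names_of_transition_named.foldl
    (fun enable_transition_names t =>
      if pvEnableA m_of_place_named t.2 then enable_transition_names ++ [t.1]
      else enable_transition_names)
    []

-- ===== PORT B =====
def get_enable_transitions_alt (m_of_place_named : List (String × Int)) (pre_place_names_of_transition_named : List (String × List String)) : List String :=
  -- first loop: remaining[t] = len(set(pre)); index[p] collects the transitions needing p
  let st := pre_place_names_of_transition_named.foldl
    (fun (st : PySem.Dict String Int × PySem.Dict String (List String)) ts =>
      let distinct := PySem.Set.ofList ts.2
      (st.1.insert ts.1 (distinct.length : Int),
       distinct.foldl (fun idx p => idx.modify p [] (· ++ [ts.1])) st.2))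
    (PySem.Dict.empty, PySem.Dict.empty)
  -- second loop: every marked place decrements the counters of the transitions indexed under it
  let remaining := m_of_place_named.foldl
    (fun rem pv =>
      if (1 : Int) ≤ pv.2 then
        (st.2.getD pv.1 []).foldl (fun rem t => rem.modify t 0 (· - 1)) rem
      else rem)
    st.1
  -- transitions with nothing left owed are enabled
  (remaining.items.filter (fun tr => tr.2 == 0)).map Prod.fst

-- ===== PRECONDITION & SPEC =====
-- Pre_ excludes association lists with duplicate keys (in the marking or in the transition
-- table): such lists cannot arise from the Python dicts both programs receive, and the
-- association-list reading of a duplicate key is ambiguous (first-match lookup vs iteration).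
def Pre_get_enable_transitions (m_of_place_named : List (String × Int)) (pre_place_names_of_transition_named : List (String × List String)) : Prop :=
  (m_of_place_named.map Prod.fst).Nodup ∧ (pre_place_names_of_transition_named.map Prod.fst).Nodup
instance (m_of_place_named : List (String × Int)) (pre_place_names_of_transition_named : List (String × List String)) : Decidable (Pre_get_enable_transitions m_of_place_named pre_place_names_of_transition_named) := by unfold Pre_get_enable_transitions; infer_instance

def pvWitness_get_enable_transitions : (List (String × Int)) × (List (String × List String)) :=
  ([("a", 1), ("b", 0)], [("t1", ["a"]), ("t2", ["a", "b"])])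

def Spec_get_enable_transitions (m_of_place_named : List (String × Int)) (pre_place_names_of_transition_named : List (String × List String)) (out : List String) : Prop := out = get_enable_transitions_alt m_of_place_named pre_place_names_of_transition_named
instance (m_of_place_named : List (String × Int)) (pre_place_names_of_transition_named : List (String × List String)) (out : List String) : Decidable (Spec_get_enable_transitions m_of_place_named pre_place_names_of_transition_named out) := by unfold Spec_get_enable_transitions; infer_instance

-- ===== CLAIM (what is proved, stated in full; the proofs are below) =====
def Claim_equal_get_enable_transitions : Prop := ∀ (m_of_place_named : List (String × Int)) (pre_place_names_of_transition_named : List (String × List String)), Dom_get_enable_transitions m_of_place_named pre_place_names_of_transition_named → Pre_get_enable_transitions m_of_place_named pre_place_names_of_transition_named → Spec_get_enable_transitions m_of_place_named pre_place_names_of_transition_named (get_enable_transitions m_of_place_named pre_place_names_of_transition_named)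

-- ===== LEMMAS AND PROOFS =====

-- the two components of B's first loop, taken separately
def pvRem0 (trans : List (String × List String)) : PySem.Dict String Int :=
  trans.foldl (fun d ts => d.insert ts.1 ((PySem.Set.ofList ts.2).length : Int)) PySem.Dict.empty

def pvIdx (trans : List (String × List String)) : PySem.Dict String (List String) :=
  trans.foldl (fun d ts => (PySem.Set.ofList ts.2).foldl (fun idx p => idx.modify p [] (· ++ [ts.1])) d) PySem.Dict.empty

-- the places holding at least one token, in marking order
def pvSat (m : List (String × Int)) : List String :=
  (m.filter (fun pv => decide (1 ≤ pv.2))).map Prod.fst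

lemma pvFirst_loop (trans : List (String × List String)) :
    trans.foldl
      (fun (st : PySem.Dict String Int × PySem.Dict String (List String)) ts =>
        let distinct := PySem.Set.ofList ts.2
        (st.1.insert ts.1 (distinct.length : Int),
         distinct.foldl (fun idx p => idx.modify p [] (· ++ [ts.1])) st.2))
      (PySem.Dict.empty, PySem.Dict.empty)
    = (pvRem0 trans, pvIdx trans) := by
  show trans.foldl (fun st ts =>
      (st.1.insert ts.1 ((PySem.Set.ofList ts.2).length : Int),
       (PySem.Set.ofList ts.2).foldl (fun idx p => idx.modify p [] (· ++ [ts.1])) st.2))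
      (PySem.Dict.empty, PySem.Dict.empty) = _
  exact PySem.List.foldl_prod_mk (fun d ts => d.insert ts.1 ((PySem.Set.ofList ts.2).length : Int)) (fun d ts => (PySem.Set.ofList ts.2).foldl (fun idx p => idx.modify p [] (· ++ [ts.1])) d) trans PySem.Dict.empty PySem.Dict.empty

-- one transition's contribution to one index bucket
lemma pvBucket (l : List String) (hl : l.Nodup) (t p : String) :
    ((l.map (fun q => (q, t))).filter (fun pr => pr.1 == p)).map Prod.snd
    = if p ∈ l then [t] else [] := by
  induction l with
  | nil => simp
  | cons q rest ih =>
    simp only [List.nodup_cons] at hl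
    simp only [List.map_cons, List.filter_cons]
    by_cases hq : q = p
    · subst hq
      simp [hl.1, ih hl.2]
    · simp only [show ((q, t).1 == p) = false by simpa using hq, Bool.false_eq_true, if_false]
      rw [ih hl.2]
      simp [Ne.symm hq]

-- index lookup: exactly the transitions whose pre-places include p, in table order
lemma pvIdx_getD (trans : List (String × List String)) (p : String) :
    (pvIdx trans).getD p []
    = (trans.filter (fun ts => decide (p ∈ ts.2))).map Prod.fst := by
  have h1 : pvIdx trans
      = (trans.flatMap (fun ts => (PySem.Set.ofList ts.2).map (fun q => (q, ts.1)))).foldl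
          (fun d pr => d.modify pr.1 [] (· ++ [pr.2])) PySem.Dict.empty := by
    rw [List.foldl_flatMap]
    unfold pvIdx
    congr 1
    funext d ts
    rw [List.foldl_map]
  rw [h1, PySem.Dict.getD_foldl_modify_append]
  simp only [PySem.Dict.getD_empty, List.nil_append]
  clear h1
  induction trans with
  | nil => rfl
  | cons ts rest ih =>
    simp only [List.flatMap_cons, List.filter_append, List.map_append, List.filter_cons, ih]
    rw [pvBucket (PySem.Set.ofList ts.2) (PySem.Set.nodup_ofList ts.2) ts.1 p]
    by_cases hp : p ∈ ts.2
    · have hmem : p ∈ PySem.Set.ofList ts.2 := (PySem.Set.mem_ofList ts.2 p).mpr hp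
      simp [hp, hmem]
    · have hmem : p ∉ PySem.Set.ofList ts.2 := fun hc => hp ((PySem.Set.mem_ofList ts.2 p).mp hc)
      simp [hp, hmem]

-- decrement loop over a list of keys, pointwise
lemma pvDec_getD (L : List String) (d : PySem.Dict String Int) (t : String) :
    (L.foldl (fun d t => d.modify t 0 (· - 1)) d).getD t 0 = d.getD t 0 - (L.count t : Int) := by
  induction L generalizing d with
  | nil => simp
  | cons x rest ih =>
    simp only [List.foldl_cons, ih, PySem.Dict.getD_modify, List.count_cons]
    by_cases hx : t = x
    · simp [hx]; push_cast; ring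
    · simp [hx, Ne.symm hx]

lemma pvSetUpdate_self (s : PySem.Set String) (L : List String) (h : ∀ x ∈ L, x ∈ s) :
    PySem.Set.update s L = s := by
  induction L generalizing s with
  | nil => rfl
  | cons x rest ih =>
    have hc : x ∈ s := h x (by simp)
    have hadd : PySem.Set.add s x = s := by simp [PySem.Set.add, hc]
    simp only [PySem.Set.update, List.foldl_cons, hadd] at *
    exact ih s (fun y hy => h y (by simp [hy]))

lemma pvDec_keys (L : List String) (d : PySem.Dict String Int) (h : ∀ x ∈ L, x ∈ d.keys) :
    (L.foldl (fun d t => d.modify t 0 (· - 1)) d).keys = d.keys := by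
  rw [PySem.Dict.keys_foldl_modify L 0 (fun _ _ => (· - 1)) d]
  exact pvSetUpdate_self _ _ h

-- the marking loop, pointwise
lemma pvMark_getD (idx : PySem.Dict String (List String)) (m : List (String × Int))
    (rem : PySem.Dict String Int) (t : String) :
    (m.foldl (fun rem pv => if (1 : Int) ≤ pv.2 then
        (idx.getD pv.1 []).foldl (fun rem t => rem.modify t 0 (· - 1)) rem else rem) rem).getD t 0
    = rem.getD t 0 - ((m.filter (fun pv => decide (1 ≤ pv.2))).map
        (fun pv => ((idx.getD pv.1 []).count t : Int))).sum := by
  induction m generalizing rem with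
  | nil => simp
  | cons pv rest ih =>
    simp only [List.foldl_cons, List.filter_cons]
    by_cases hv : (1 : Int) ≤ pv.2
    · simp only [hv, if_true, decide_true, List.map_cons, List.sum_cons, ih, pvDec_getD]
      ring
    · rw [if_neg hv, ih]
      simp [hv]

-- the marking loop never adds keys (it only decrements existing transitions)
lemma pvMark_keys (idx : PySem.Dict String (List String)) (m : List (String × Int))
    (rem : PySem.Dict String Int) (h : ∀ p, ∀ x ∈ idx.getD p [], x ∈ rem.keys) :
    (m.foldl (fun rem pv => if (1 : Int) ≤ pv.2 then
        (idx.getD pv.1 []).foldl (fun rem t => rem.modify t 0 (· - 1)) rem else rem) rem).keys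
    = rem.keys := by
  induction m generalizing rem with
  | nil => rfl
  | cons pv rest ih =>
    simp only [List.foldl_cons]
    by_cases hv : (1 : Int) ≤ pv.2
    · simp only [hv, if_true]
      have hk := pvDec_keys (idx.getD pv.1 []) rem (h pv.1)
      rw [ih _ (fun p x hx => by rw [hk]; exact h p x hx), hk]
    · rw [if_neg hv]
      exact ih rem h

lemma pvRem0_items (trans : List (String × List String)) (hT : (trans.map Prod.fst).Nodup) :
    (pvRem0 trans).items = trans.map (fun ts => (ts.1, ((PySem.Set.ofList ts.2).length : Int))) := by
  unfold pvRem0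
  rw [PySem.Dict.items_foldl_insert_fresh trans Prod.fst (fun ts => ((PySem.Set.ofList ts.2).length : Int)) PySem.Dict.empty (fun a _ => PySem.Dict.contains_empty a.1) hT]
  simp [PySem.Dict.empty]

-- under Nodup marking keys, A's per-place check is membership in pvSat
lemma pvLookup_eq_mem (m : List (String × Int)) (hm : (m.map Prod.fst).Nodup) (p : String) :
    (match (PySem.Dict.mk m).get? p with
      | none => false
      | some v => if v < 1 then false else true)
    = decide (p ∈ pvSat m) := by
  unfold pvSat
  induction m with
  | nil => simp [PySem.Dict.get?]
  | cons kv rest ih =>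
    obtain ⟨k, v⟩ := kv
    simp only [List.map_cons, List.nodup_cons] at hm
    rw [PySem.Dict.get?_mk_cons]
    by_cases hk : k = p
    · subst hk
      by_cases hv : v < 1
      · have hnot : k ∉ (rest.filter (fun kv => decide (1 ≤ kv.2))).map Prod.fst := by
          intro hmem
          exact hm.1 (by
            obtain ⟨q, hq, hq1⟩ := List.mem_map.mp hmem
            exact List.mem_map.mpr ⟨q, List.mem_of_mem_filter hq, hq1⟩)
        simp [hv, hnot]
      · simp [hv, (by omega : (1:Int) ≤ v)]
    · rw [if_neg (by simp [hk]), ih hm.2]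
      by_cases hv1 : (1 : Int) ≤ v <;>
        simp [hv1, Ne.symm hk]

lemma pvEnableA_iff (m : List (String × Int)) (hm : (m.map Prod.fst).Nodup) (ps : List String) :
    pvEnableA m ps = true ↔ ∀ p ∈ ps, p ∈ pvSat m := by
  induction ps with
  | nil => simp [pvEnableA]
  | cons p rest ih =>
    have hstep : pvEnableA m (p :: rest) = (decide (p ∈ pvSat m) && pvEnableA m rest) := by
      rw [← pvLookup_eq_mem m hm p]
      simp only [pvEnableA]
      cases hg : (PySem.Dict.mk m).get? p with
      | none => simp
      | some v => by_cases hv : v < 1 <;> simp [hv]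
    rw [hstep]
    simp [Bool.and_eq_true, ih, List.forall_mem_cons]

lemma pvSat_nodup (m : List (String × Int)) (hm : (m.map Prod.fst).Nodup) : (pvSat m).Nodup := by
  unfold pvSat
  have hsub : ((m.filter (fun pv => decide (1 ≤ pv.2))).map Prod.fst).Sublist (m.map Prod.fst) :=
    (List.filter_sublist (l := m)).map Prod.fst
  exact hsub.nodup hm

-- two nodup lists count their common elements symmetrically
lemma pvCount_symm (A B : List String) (hA : A.Nodup) (hB : B.Nodup) :
    (A.filter (fun x => decide (x ∈ B))).length = (B.filter (fun x => decide (x ∈ A))).length := by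
  rw [← List.toFinset_card_of_nodup (hA.filter _), ← List.toFinset_card_of_nodup (hB.filter _)]
  congr 1
  ext x
  simp only [List.mem_toFinset, List.mem_filter, decide_eq_true_eq]
  tauto

-- the core: the counter reaches 0 exactly when A's inner loop succeeds
lemma pvCounter_zero_iff (m : List (String × Int)) (hm : (m.map Prod.fst).Nodup) (pre : List String) :
    (((PySem.Set.ofList pre).length : Int)
      - (((pvSat m).filter (fun p => decide (p ∈ PySem.Set.ofList pre))).length : Int) = 0)
    ↔ pvEnableA m pre = true := by
  rw [pvEnableA_iff m hm pre]
  rw [pvCount_symm (pvSat m) (PySem.Set.ofList pre) (pvSat_nodup m hm) (PySem.Set.nodup_ofList pre)]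
  have hle := List.length_filter_le (fun x => decide (x ∈ pvSat m)) (PySem.Set.ofList pre)
  constructor
  · intro h0
    have heq : ((PySem.Set.ofList pre).filter (fun x => decide (x ∈ pvSat m))).length = (PySem.Set.ofList pre).length := by omega
    have hfe : (PySem.Set.ofList pre).filter (fun x => decide (x ∈ pvSat m)) = PySem.Set.ofList pre :=
      (List.filter_sublist (l := PySem.Set.ofList pre)).eq_of_length heq
    intro p hp
    have hmem : p ∈ PySem.Set.ofList pre := (PySem.Set.mem_ofList pre p).mpr hp
    rw [← hfe] at hmem
    simpa using (List.mem_filter.mp hmem).2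
  · intro hall
    have hfe : (PySem.Set.ofList pre).filter (fun x => decide (x ∈ pvSat m)) = PySem.Set.ofList pre := by
      rw [List.filter_eq_self]
      intro a ha
      simpa using hall a ((PySem.Set.mem_ofList pre a).mp ha)
    rw [hfe]
    omega

-- counting one transition name in an index bucket
lemma pvIdx_count (trans : List (String × List String)) (hT : (trans.map Prod.fst).Nodup)
    (ts : String × List String) (hts : ts ∈ trans) (p : String) :
    (((trans.filter (fun ts' => decide (p ∈ ts'.2))).map Prod.fst).count ts.1 : Int)
    = if p ∈ ts.2 then 1 else 0 := by
  induction trans with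
  | nil => cases hts
  | cons hd rest ih =>
    simp only [List.map_cons, List.nodup_cons] at hT
    rcases List.mem_cons.mp hts with rfl | hmem
    · have hzero : ((rest.filter (fun ts' => decide (p ∈ ts'.2))).map Prod.fst).count ts.1 = 0 := by
        rw [List.count_eq_zero]
        intro hmem
        obtain ⟨q, hq, hq1⟩ := List.mem_map.mp hmem
        exact hT.1 (List.mem_map.mpr ⟨q, List.mem_of_mem_filter hq, hq1⟩)
      by_cases hc : p ∈ ts.2
      · simp [List.filter_cons, hc, List.count_cons, hzero]
      · simp [List.filter_cons, hc, hzero]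
    · have hne : hd.1 ≠ ts.1 := by
        intro heq
        exact hT.1 (heq ▸ List.mem_map.mpr ⟨ts, hmem, rfl⟩)
      by_cases hc : p ∈ hd.2
      · simp only [List.filter_cons, hc, decide_true, if_true, List.map_cons]
        rw [List.count_cons]
        simp only [show (hd.1 == ts.1) = false by simpa using hne, Bool.false_eq_true, if_false, Nat.add_zero]
        exact ih hT.2 hmem
      · simp only [List.filter_cons, hc, decide_false]
        simpa using ih hT.2 hmem

-- ===== VERDICT (by name: the statement is the Claim_ definition above) =====
theorem get_enable_transitions_spec : Claim_equal_get_enable_transitions := by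
  intro m trans _ hpre
  obtain ⟨hm, hT⟩ := hpre
  unfold Spec_get_enable_transitions get_enable_transitions get_enable_transitions_alt
  rw [PySem.List.foldl_append_if (fun ts => pvEnableA m ts.2) Prod.fst]
  simp only [List.nil_append, pvFirst_loop]
  -- keys of the initial counter dict
  have hkeys0 : (pvRem0 trans).keys = trans.map Prod.fst := by
    simp only [PySem.Dict.keys, pvRem0_items trans hT, List.map_map]
    rfl
  -- the marking loop keeps the keys
  have hkeysF : (m.foldl (fun rem pv => if (1 : Int) ≤ pv.2 then
      ((pvIdx trans).getD pv.1 []).foldl (fun rem t => rem.modify t 0 (· - 1)) rem else rem)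
      (pvRem0 trans)).keys = trans.map Prod.fst := by
    rw [pvMark_keys, hkeys0]
    intro p x hx
    rw [pvIdx_getD] at hx
    obtain ⟨q, hq, hq1⟩ := List.mem_map.mp hx
    rw [hkeys0]
    exact List.mem_map.mpr ⟨q, List.mem_of_mem_filter hq, hq1⟩
  set rem := m.foldl (fun rem pv => if (1 : Int) ≤ pv.2 then
      ((pvIdx trans).getD pv.1 []).foldl (fun rem t => rem.modify t 0 (· - 1)) rem else rem)
      (pvRem0 trans) with hremdef
  have hnd : rem.keys.Nodup := by rw [hkeysF]; exact hT
  rw [PySem.Dict.items_eq_map_keys rem hnd 0, hkeysF]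
  rw [List.map_map, List.filter_map, List.map_map]
  have hcomp : Prod.fst ∘ ((fun k => (k, rem.getD k 0)) ∘ Prod.fst)
      = (Prod.fst : String × List String → String) := rfl
  rw [hcomp]
  congr 1
  apply List.filter_congr
  intro ts hts
  -- the counter of ts at the end of the marking loop
  have hr0 : (pvRem0 trans).getD ts.1 0 = ((PySem.Set.ofList ts.2).length : Int) := by
    apply PySem.Dict.getD_of_mem_items
    · rw [pvRem0_items trans hT]
      exact List.mem_map.mpr ⟨ts, hts, rfl⟩
    · rw [hkeys0]; exact hT
  have hsum : ((m.filter (fun pv => decide (1 ≤ pv.2))).map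
      (fun pv => (((pvIdx trans).getD pv.1 []).count ts.1 : Int))).sum
      = (((pvSat m).filter (fun p => decide (p ∈ PySem.Set.ofList ts.2))).length : Int) := by
    have h1 : ((m.filter (fun pv => decide (1 ≤ pv.2))).map
        (fun pv => (((pvIdx trans).getD pv.1 []).count ts.1 : Int)))
        = (pvSat m).map (fun p => if decide (p ∈ PySem.Set.ofList ts.2) then (1 : Int) else 0) := by
      unfold pvSat
      rw [List.map_map]
      apply List.map_congr_left
      intro pv _
      simp only [Function.comp]
      rw [pvIdx_getD, pvIdx_count trans hT ts hts pv.1]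
      simp [PySem.Set.mem_ofList]
    rw [h1, PySem.List.sum_map_ite_one_zero, List.countP_eq_length_filter]
  have hR : rem.getD ts.1 0 = ((PySem.Set.ofList ts.2).length : Int)
      - (((pvSat m).filter (fun p => decide (p ∈ PySem.Set.ofList ts.2))).length : Int) := by
    rw [hremdef, pvMark_getD, hr0, hsum]
  show pvEnableA m ts.2 = (rem.getD ts.1 0 == 0)
  rw [hR, Bool.eq_iff_iff, beq_iff_eq]
  exact (pvCounter_zero_iff m hm ts.2).symm
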